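-- pv_equiv track=rewrite | github.com/LeePaDack/Test | 프로그래머스/0/181918. 배열 만들기 4/배열 만들기 4.py | solution
-- ===== SOURCE A (Python) =====
-- def solution(arr):
--     stk = []
--     i = 0
--     while i < len(arr):
--         if stk == []:
--             stk.append(arr[i])
--             i += 1
--         else :
--             if stk[-1] < arr[i]:
--                 stk.append(arr[i])
--                 i += 1
--             else:
--                 stk.remove(stk[-1])
--     return stk
-- ===== SOURCE B (Python) =====
-- def solution(arr):
--     # Right-to-left scan: an element survives A's stack exactly when it is
--     # strictly smaller than every element after it, i.e. strictly below the
--     # running minimum of the suffix already scanned.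
--     out = []
--     m = None  # minimum of the elements to the right (None: none yet)
--     for x in reversed(arr):
--         if m is None or x < m:
--             out.append(x)
--             m = x  # x is kept only when it is the new suffix minimum
--     out.reverse()
--     return out
-- ===== Notes on version B (the rewrite author's own statement) =====
-- stated objective: faster
-- what changed: Replaces the stack simulation with pops (worst-case quadratic due to list.remove scanning) by a single right-to-left pass that keeps an element exactly when it is strictly below the running minimum of the suffix.
import Mathlib
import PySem

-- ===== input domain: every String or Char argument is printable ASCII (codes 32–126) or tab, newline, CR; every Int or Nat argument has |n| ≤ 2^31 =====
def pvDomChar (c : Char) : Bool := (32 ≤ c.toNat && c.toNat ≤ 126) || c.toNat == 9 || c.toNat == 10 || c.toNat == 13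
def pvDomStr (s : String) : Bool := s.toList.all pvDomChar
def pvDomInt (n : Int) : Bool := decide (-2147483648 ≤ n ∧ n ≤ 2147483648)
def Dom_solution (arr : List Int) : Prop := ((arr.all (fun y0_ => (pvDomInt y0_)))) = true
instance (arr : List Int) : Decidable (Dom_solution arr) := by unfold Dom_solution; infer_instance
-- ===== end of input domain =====

-- B replaces A's stack simulation (list.remove pops) by one right-to-left suffix-minimum pass.

-- ===== PORT A =====
-- A's while loop: push when the stack is empty or its top < arr[i] (advancing i), else
-- stk.remove(stk[-1]) = erase the first occurrence of the last element (i unchanged).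
def solLoop (arr : List Int) (stk : List Int) (i : Nat) : List Int :=
  if h : i < arr.length then
    match stk with
    | [] => solLoop arr [arr[i]] (i + 1)
    | y :: ys =>
      if (y :: ys).getLast (by simp) < arr[i] then
        solLoop arr ((y :: ys) ++ [arr[i]]) (i + 1)
      else
        solLoop arr ((y :: ys).erase ((y :: ys).getLast (by simp))) i
  else stk
termination_by 2 * (arr.length - i) + stk.length
decreasing_by
  · simp; omega
  · simp; omega
  · have hm : (y :: ys).getLast (by simp) ∈ (y :: ys) := List.getLast_mem (by simp)
    have := List.length_erase_of_mem hm
    simp at this ⊢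

def solution (arr : List Int) : List Int := solLoop arr [] 0

-- ===== PORT B =====
-- (out, m): collected kept elements (in right-to-left order) and the suffix minimum so far.
def altStep (acc : List Int × Option Int) (x : Int) : List Int × Option Int :=
  match acc.2 with
  | none => (acc.1 ++ [x], some x)
  | some m => if x < m then (acc.1 ++ [x], some x) else acc

def solution_alt (arr : List Int) : List Int :=
  (arr.reverse.foldl altStep ([], none)).1.reverse

-- ===== PRECONDITION & SPEC =====
def Spec_solution (arr : List Int) (out : List Int) : Prop := out = solution_alt arr
instance (arr : List Int) (out : List Int) : Decidable (Spec_solution arr out) := by unfold Spec_solution; infer_instance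

-- ===== CLAIM (what is proved, stated in full; the proofs are below) =====
def Claim_equal_solution : Prop := ∀ (arr : List Int), Dom_solution arr → Spec_solution arr (solution arr)

-- ===== LEMMAS AND PROOFS =====

-- the common characterisation: keep x iff it is strictly below every later element
def keepF : List Int → List Int
  | [] => []
  | x :: xs => if xs.all (fun z => x < z) then x :: keepF xs else keepF xs

-- B-side: the fold (in foldr form) computes (keepF xs).reverse together with the minimum of xs
lemma alt_foldr_char (xs : List Int) :
    (xs.foldr (fun x acc => altStep acc x) ([], none)).1 = (keepF xs).reverse ∧
      ((xs.foldr (fun x acc => altStep acc x) ([], none)).2 = none ∧ xs = [] ∨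
       ∃ v, (xs.foldr (fun x acc => altStep acc x) ([], none)).2 = some v ∧ v ∈ xs ∧ ∀ z ∈ xs, v ≤ z) := by
  induction xs with
  | nil => simp [keepF]
  | cons x xs ih =>
    rcases hq : xs.foldr (fun x acc => altStep acc x) ([], none) with ⟨out, m⟩
    rw [hq] at ih
    obtain ⟨h1, h2⟩ := ih
    simp only at h1 h2
    have hstep : (x :: xs).foldr (fun x acc => altStep acc x) ([], none)
        = altStep (out, m) x := by rw [List.foldr_cons, hq]
    rcases h2 with ⟨hm, hnil⟩ | ⟨v, hm, hv, hmin⟩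
    · subst hnil hm
      constructor
      · rw [hstep]; simp [altStep, keepF, h1]
      · right; exact ⟨x, by rw [hstep]; simp [altStep], by simp, by simp⟩
    · subst hm
      have hall : x < v ↔ (xs.all (fun z => x < z) = true) := by
        simp only [List.all_eq_true, decide_eq_true_eq]
        exact ⟨fun hx z hz => lt_of_lt_of_le hx (hmin z hz), fun h => h v hv⟩
      by_cases hx : x < v
      · constructor
        · rw [hstep]; simp [altStep, hx, keepF, h1, hall.mp hx]
        · right
          refine ⟨x, by rw [hstep]; simp [altStep, hx], by simp, ?_⟩
          intro z hz
          rcases List.mem_cons.mp hz with rfl | hz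
          · exact le_refl _
          · exact le_of_lt (lt_of_lt_of_le hx (hmin z hz))
      · have hnall : ¬ xs.all (fun z => x < z) = true := fun h => hx (hall.mpr h)
        constructor
        · rw [hstep]; simp [altStep, hx, keepF, h1, hnall]
        · right
          refine ⟨v, by rw [hstep]; simp [altStep, hx], by simp [hv], ?_⟩
          intro z hz
          rcases List.mem_cons.mp hz with rfl | hz
          · omega
          · exact hmin z hz

lemma alt_eq_keepF (arr : List Int) : solution_alt arr = keepF arr := by
  unfold solution_alt
  rw [List.foldl_reverse, (alt_foldr_char arr).1, List.reverse_reverse]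

-- unfolding equation of solLoop for a nonempty stack
lemma solLoop_cons (arr : List Int) (y : Int) (ys : List Int) (i : Nat) (h : i < arr.length) :
    solLoop arr (y :: ys) i =
      if (y :: ys).getLast (by simp) < arr[i] then solLoop arr ((y :: ys) ++ [arr[i]]) (i + 1)
      else solLoop arr ((y :: ys).erase ((y :: ys).getLast (by simp))) i := by
  rw [solLoop, dif_pos h]

-- erasing the last element of a duplicate-free list drops it
lemma erase_getLast_of_nodup (l : List Int) (h : l ≠ []) (hnd : l.Nodup) :
    l.erase (l.getLast h) = l.dropLast := by
  have hdecomp := List.dropLast_append_getLast h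
  generalize hA : l.getLast h = a at hdecomp
  conv_lhs => rw [← hdecomp]
  have hnd' : (l.dropLast ++ [a]).Nodup := by rw [hdecomp]; exact hnd
  have hdisj := List.disjoint_of_nodup_append hnd'
  rw [List.erase_append_right _ (fun hmem => hdisj hmem (by simp)),
    List.erase_cons_head, List.append_nil]

-- elements of a strictly increasing list are ≤ its last element
lemma mem_le_getLast {l : List Int} (hp : l.Pairwise (· < ·)) (h : l ≠ [])
    {a : Int} (ha : a ∈ l) : a ≤ l.getLast h := by
  have hdecomp : l = l.dropLast ++ [l.getLast h] := (List.dropLast_append_getLast h).symm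
  have ha' : a ∈ l.dropLast ++ [l.getLast h] := hdecomp ▸ ha
  rcases List.mem_append.mp ha' with h1 | h2
  · have hp' : (l.dropLast ++ [l.getLast h]).Pairwise (· < ·) := hdecomp ▸ hp
    have := (List.pairwise_append.mp hp').2.2 a h1 (l.getLast h) (by simp)
    omega
  · simp at h2; omega

-- A-side: from a strictly increasing stack the loop returns the stack elements that are
-- below every remaining element, followed by keepF of the remaining suffix
lemma loopA_char (arr : List Int) (stk : List Int) (i : Nat) :
    stk.Pairwise (· < ·) →
    solLoop arr stk i
      = stk.filter (fun y => (arr.drop i).all (fun z => y < z)) ++ keepF (arr.drop i) := by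
  induction stk, i using solLoop.induct arr with
  | case1 i h ih =>
    intro _
    rw [solLoop, dif_pos h, ih (by simp)]
    have hd : arr.drop i = arr[i] :: arr.drop (i + 1) := List.drop_eq_getElem_cons h
    rw [hd]
    simp only [keepF, List.filter_nil, List.nil_append]
    by_cases hc : (arr.drop (i + 1)).all (fun z => arr[i] < z) = true
    · simp [hc]
    · simp [hc]
  | case2 i h y ys hlt ih =>
    intro hp
    have hne : (y :: ys) ≠ [] := by simp
    have hlast : ∀ a ∈ (y :: ys), a < arr[i] := fun a ha =>
      lt_of_le_of_lt (mem_le_getLast hp hne ha) hlt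
    have hp' : ((y :: ys) ++ [arr[i]]).Pairwise (· < ·) := by
      rw [List.pairwise_append]
      exact ⟨hp, by simp, fun a ha b hb => by simp at hb; subst hb; exact hlast a ha⟩
    rw [solLoop_cons arr y ys i h, if_pos hlt, ih hp']
    have hd : arr.drop i = arr[i] :: arr.drop (i + 1) := List.drop_eq_getElem_cons h
    rw [hd]
    have hfc : (y :: ys).filter (fun a => (arr[i] :: arr.drop (i + 1)).all (fun z => a < z))
        = (y :: ys).filter (fun a => (arr.drop (i + 1)).all (fun z => a < z)) := by
      apply List.filter_congr
      intro a ha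
      simp only [List.all_cons, decide_eq_true (hlast a ha), Bool.true_and]
    rw [hfc]
    simp only [keepF, List.filter_append]
    by_cases hc : (arr.drop (i + 1)).all (fun z => arr[i] < z) = true
    · simp [hc]
    · simp [hc]
  | case3 i h y ys hlt ih =>
    intro hp
    have hne : (y :: ys) ≠ [] := by simp
    have hnd : (y :: ys).Nodup := hp.nodup
    have herase := erase_getLast_of_nodup (y :: ys) hne hnd
    have hp' : (y :: ys).dropLast.Pairwise (· < ·) := hp.sublist (List.dropLast_sublist _)
    rw [solLoop_cons arr y ys i h, if_neg hlt, ih (by rw [herase]; exact hp'), herase]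
    have hd : arr.drop i = arr[i] :: arr.drop (i + 1) := List.drop_eq_getElem_cons h
    have hlastfalse : ((arr.drop i).all (fun z => (y :: ys).getLast hne < z)) = false := by
      rw [hd]
      simp only [List.all_cons, Bool.and_eq_false_iff]
      left
      simpa using hlt
    conv_rhs => rw [← List.dropLast_append_getLast hne]
    rw [List.filter_append]
    simp [hlastfalse]
  | case4 stk i h =>
    intro _
    rw [solLoop, dif_neg h]
    have hd : arr.drop i = [] := List.drop_eq_nil_of_le (by omega)
    simp [hd, keepF]

-- ===== VERDICT (by name: the statement is the Claim_ definition above) =====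
theorem solution_spec : Claim_equal_solution := by
  intro arr _
  unfold Spec_solution solution
  rw [loopA_char arr [] 0 (by simp), alt_eq_keepF]
  simp
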